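-- pv_equiv track=rewrite | github.com/josemalonsom/advent-of-code | python/src/year2015/day08.py | solve_puzzle_2
-- ===== SOURCE A (Python) =====
-- def solve_puzzle_2(puzzle_input):
--
--     number_of_code_characters = 0
--     number_of_encoded_characters = 0
--
--     for string in puzzle_input:
--         number_of_code_characters += len(string)
--
--         string = string.replace('\\', '\\\\').replace('"', '\\"')
--         number_of_encoded_characters += len(string)
--
--         # add the double quotes around the string
--         number_of_encoded_characters += 2
--
--     return number_of_encoded_characters - number_of_code_characters
-- ===== SOURCE B (Python) =====
-- def solve_puzzle_2(puzzle_input):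
--     return sum(2 + s.count('\\') + s.count('"') for s in puzzle_input)
-- ===== Notes on version B (the rewrite author's own statement) =====
-- stated objective: simpler
-- what changed: Instead of building each escaped string with two .replace calls and maintaining separate code-character and encoded-character counters to subtract at the end, B computes each string's overhead directly as 2 + count of backslashes + count of quotes and sums it in one expression.
import Mathlib
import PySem

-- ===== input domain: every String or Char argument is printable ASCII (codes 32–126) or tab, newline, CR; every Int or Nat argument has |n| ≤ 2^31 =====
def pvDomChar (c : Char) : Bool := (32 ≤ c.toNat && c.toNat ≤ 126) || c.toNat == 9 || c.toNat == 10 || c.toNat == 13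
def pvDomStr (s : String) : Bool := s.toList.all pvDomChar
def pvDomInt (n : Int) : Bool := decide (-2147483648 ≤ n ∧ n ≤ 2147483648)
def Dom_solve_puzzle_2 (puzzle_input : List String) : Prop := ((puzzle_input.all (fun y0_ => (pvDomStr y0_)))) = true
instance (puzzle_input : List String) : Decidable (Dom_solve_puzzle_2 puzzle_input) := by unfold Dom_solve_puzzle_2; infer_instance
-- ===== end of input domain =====

-- B replaces A's two-counter loop over escaped copies of each string by a one-line
-- sum of per-string overheads 2 + count('\\') + count('"') (objective: simpler).

-- ===== PORT A =====
-- A's loop: two running counters, the escaped string built by two replaces.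
def solve_puzzle_2 (puzzle_input : List String) : Int :=
  let st := puzzle_input.foldl
    (fun (acc : Int × Int) string =>
      let number_of_code_characters := acc.1 + PySem.Str.len string
      let string := PySem.Str.replace (PySem.Str.replace string "\\" "\\\\") "\"" "\\\""
      let number_of_encoded_characters := acc.2 + PySem.Str.len string + 2
      (number_of_code_characters, number_of_encoded_characters))
    (0, 0)
  st.2 - st.1

-- ===== PORT B =====
def solve_puzzle_2_alt (puzzle_input : List String) : Int :=
  (puzzle_input.map (fun s =>
    2 + (PySem.Str.count s "\\" : Int) + (PySem.Str.count s "\"" : Int))).sum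

-- ===== PRECONDITION & SPEC =====
def Spec_solve_puzzle_2 (puzzle_input : List String) (out : Int) : Prop := out = solve_puzzle_2_alt puzzle_input
instance (puzzle_input : List String) (out : Int) : Decidable (Spec_solve_puzzle_2 puzzle_input out) := by unfold Spec_solve_puzzle_2; infer_instance

-- ===== CLAIM (what is proved, stated in full; the proofs are below) =====
def Claim_equal_solve_puzzle_2 : Prop := ∀ (puzzle_input : List String), Dom_solve_puzzle_2 puzzle_input → Spec_solve_puzzle_2 puzzle_input (solve_puzzle_2 puzzle_input)

-- ===== LEMMAS AND PROOFS =====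

-- replace with a single-character pattern is a flatMap
theorem replace_single_go (c : Char) (new : List Char) :
    ∀ (fuel : Nat) (l acc : List Char), l.length ≤ fuel →
      PySem.Chars.replace.go [c] new fuel l acc
        = acc.reverse ++ l.flatMap (fun x => if x = c then new else [x]) := by
  intro fuel
  induction fuel with
  | zero =>
    intro l acc h
    have : l = [] := List.eq_nil_of_length_eq_zero (Nat.le_zero.mp h)
    subst this
    simp [PySem.Chars.replace.go]
  | succ n ih =>
    intro l acc h
    cases l with
    | nil => simp [PySem.Chars.replace.go]
    | cons x t =>
      simp only [PySem.Chars.replace.go]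
      by_cases hx : x = c
      · subst hx
        have hp : List.isPrefixOf [x] (x :: t) = true := by
          simp [List.isPrefixOf]
        rw [if_pos hp]
        simp only [List.length_cons, List.length_nil, List.drop_succ_cons, List.drop_zero]
        rw [ih t (new.reverse ++ acc) (by simpa using Nat.le_of_succ_le_succ h)]
        simp
      · have hp : List.isPrefixOf [x] (x :: t) = true := by simp [List.isPrefixOf]
        -- pattern is [c], head is x ≠ c
        rw [if_neg (by simp [List.isPrefixOf]; exact fun h => hx (Eq.symm h))]
        rw [ih t (x :: acc) (by simpa using Nat.le_of_succ_le_succ h)]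
        simp [hx]

theorem replace_single (s : List Char) (c : Char) (new : List Char) :
    PySem.Chars.replace s [c] new = s.flatMap (fun x => if x = c then new else [x]) := by
  unfold PySem.Chars.replace
  rw [if_neg (by simp)]
  simpa using replace_single_go c new s.length s [] le_rfl

-- count with a single-character pattern is List.count
theorem count_single_go (c : Char) :
    ∀ (fuel : Nat) (l : List Char) (acc : Nat), l.length ≤ fuel →
      PySem.Chars.count.go [c] fuel l acc = acc + l.count c := by
  intro fuel
  induction fuel with
  | zero =>
    intro l acc h
    have : l = [] := List.eq_nil_of_length_eq_zero (Nat.le_zero.mp h)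
    subst this
    simp [PySem.Chars.count.go]
  | succ n ih =>
    intro l acc h
    cases l with
    | nil => simp [PySem.Chars.count.go]
    | cons x t =>
      simp only [PySem.Chars.count.go]
      by_cases hx : x = c
      · subst hx
        rw [if_pos (by simp [List.isPrefixOf])]
        simp only [List.length_cons, List.length_nil, List.drop_succ_cons, List.drop_zero]
        rw [ih t (acc + 1) (by simpa using Nat.le_of_succ_le_succ h)]
        simp
        omega
      · rw [if_neg (by simp [List.isPrefixOf]; exact fun h => hx (Eq.symm h))]
        rw [ih t acc (by simpa using Nat.le_of_succ_le_succ h)]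
        simp [hx]

theorem count_single (s : List Char) (c : Char) :
    PySem.Chars.count s [c] = s.count c := by
  unfold PySem.Chars.count
  rw [if_neg (by simp)]
  simpa using count_single_go c s.length s 0 le_rfl

-- per-string: length of the doubly-escaped string
theorem escaped_len (s : List Char) :
    ((s.flatMap (fun x => if x = '\\' then ['\\', '\\'] else [x])).flatMap
        (fun x => if x = '"' then ['\\', '"'] else [x])).length
      = s.length + s.count '\\' + s.count '"' := by
  induction s with
  | nil => simp
  | cons x t ih =>
    by_cases h1 : x = '\\'
    · subst h1
      simp [ih]
      omega
    · by_cases h2 : x = '"'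
      · subst h2
        simp [ih]
        omega
      · simp [h1, h2, ih]
        omega

theorem per_string (s : String) :
    PySem.Str.len (PySem.Str.replace (PySem.Str.replace s "\\" "\\\\") "\"" "\\\"") + 2
      = 2 + (PySem.Str.count s "\\" : Int) + (PySem.Str.count s "\"" : Int) + PySem.Str.len s := by
  have h1 : (PySem.Str.replace s "\\" "\\\\").toList
      = s.toList.flatMap (fun x => if x = '\\' then ['\\', '\\'] else [x]) := by
    rw [PySem.Str.toList_replace]
    have : ("\\" : String).toList = ['\\'] := by decide
    rw [this, replace_single]
    rfl
  have h2 : (PySem.Str.replace (PySem.Str.replace s "\\" "\\\\") "\"" "\\\"").toList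
      = (s.toList.flatMap (fun x => if x = '\\' then ['\\', '\\'] else [x])).flatMap (fun x => if x = '"' then ['\\', '"'] else [x]) := by
    rw [PySem.Str.toList_replace]
    have hq : ("\"" : String).toList = ['"'] := by decide
    rw [hq, replace_single, h1]
    rfl
  rw [PySem.Str.len_eq, PySem.Str.len_eq, PySem.Str.count_eq, PySem.Str.count_eq, h2]
  have hb : ("\\" : String).toList = ['\\'] := by decide
  have hq : ("\"" : String).toList = ['"'] := by decide
  rw [hb, hq, count_single, count_single]
  rw [escaped_len]
  push_cast
  ring

-- A's fold invariant
theorem fold_pair (l : List String) : ∀ (code enc : Int),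
    (l.foldl
      (fun (acc : Int × Int) string =>
        (acc.1 + PySem.Str.len string,
         acc.2 + PySem.Str.len (PySem.Str.replace (PySem.Str.replace string "\\" "\\\\") "\"" "\\\"") + 2))
      (code, enc)).2
    - (l.foldl
      (fun (acc : Int × Int) string =>
        (acc.1 + PySem.Str.len string,
         acc.2 + PySem.Str.len (PySem.Str.replace (PySem.Str.replace string "\\" "\\\\") "\"" "\\\"") + 2))
      (code, enc)).1
    = enc - code + (l.map (fun s =>
        2 + (PySem.Str.count s "\\" : Int) + (PySem.Str.count s "\"" : Int))).sum := by
  induction l with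
  | nil => simp
  | cons x t ih =>
    intro code enc
    simp only [List.foldl_cons, List.map_cons, List.sum_cons]
    rw [ih]
    have := per_string x
    omega

-- ===== VERDICT (by name: the statement is the Claim_ definition above) =====
theorem solve_puzzle_2_spec : Claim_equal_solve_puzzle_2 := by
  intro puzzle_input _
  unfold Spec_solve_puzzle_2 solve_puzzle_2 solve_puzzle_2_alt
  simpa using fold_pair puzzle_input 0 0
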